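-- pv_equiv track=rewrite | github.com/networkx/networkx | networkx/algorithms/community/leiden.py | _is_valid_refinement
-- ===== SOURCE A (Python) =====
-- def _is_valid_refinement(p, ref_p):
--     """
--     helper function useful during debugging, checking whether
--     a refined partition ref_p is a true refinement of a partition p
--     """
--     val = True
--     for c1 in ref_p:
--         for c2 in p:
--             if c1.issubset(c2):
--                 break
--         else:
--             val = False
--     return val
-- ===== SOURCE B (Python) =====
-- def _is_valid_refinement(p, ref_p):
--     # Invert p once: element -> set of indices of the communities of p containing it.
--     containers = {}
--     for i, c2 in enumerate(p):
--         for e in c2: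
--             containers.setdefault(e, set()).add(i)
--     all_idx = set(range(len(p)))
--     empty = set()
--     ok = True
--     for c1 in ref_p:
--         common = all_idx
--         for e in c1:
--             common = common & containers.get(e, empty)
--             if not common:
--                 break
--         if not common:
--             ok = False
--     return ok
-- ===== Notes on version B (the rewrite author's own statement) =====
-- stated objective: alternative
-- what changed: Instead of scanning all of p for every refined community, B inverts p once into an element->set-of-community-indices map and, per refined community, intersects the index sets of its elements (empty intersection = contained in no community).
import Mathlib
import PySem

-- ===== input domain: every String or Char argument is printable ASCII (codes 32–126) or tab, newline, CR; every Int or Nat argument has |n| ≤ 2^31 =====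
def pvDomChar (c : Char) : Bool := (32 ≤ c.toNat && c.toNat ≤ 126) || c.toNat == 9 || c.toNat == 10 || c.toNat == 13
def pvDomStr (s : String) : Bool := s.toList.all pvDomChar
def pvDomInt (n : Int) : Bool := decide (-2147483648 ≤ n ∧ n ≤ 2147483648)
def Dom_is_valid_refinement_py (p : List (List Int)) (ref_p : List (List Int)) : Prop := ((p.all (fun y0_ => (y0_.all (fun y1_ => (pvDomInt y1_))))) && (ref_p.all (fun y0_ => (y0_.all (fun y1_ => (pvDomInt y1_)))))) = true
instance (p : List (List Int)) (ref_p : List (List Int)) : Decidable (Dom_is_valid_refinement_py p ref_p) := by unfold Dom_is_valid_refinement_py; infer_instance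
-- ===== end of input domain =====

-- B inverts the partition p once into an element→communities index and intersects
-- per refined community; A scans all of p for every refined community.

-- ===== PORT A =====
-- A: for each c1 in ref_p, scan p for a c2 with c1 ⊆ c2; if none, val becomes False.
def is_valid_refinement_py (p : List (List Int)) (ref_p : List (List Int)) : Bool :=
  ref_p.foldl (fun val c1 =>
    if p.any (fun c2 => PySem.Set.issubset c1 c2) then val else false) true

-- ===== PORT B =====
-- containers.setdefault(e, set()).add(i) leaves e mapped to (containers.get(e, set()) ∪ {i})
def pvBuildIdx (p : List (List Int)) : PySem.Dict Int (PySem.Set Int) :=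
  (PySem.List.enumerate p 0).foldl
    (fun d ic => ic.2.foldl
      (fun d e => d.insert e (PySem.Set.add (d.getD e PySem.Set.empty) ic.1)) d)
    PySem.Dict.empty

-- the inner loop over c1: intersect the index sets, break as soon as empty
def pvInterLoop (containers : PySem.Dict Int (PySem.Set Int)) :
    PySem.Set Int → List Int → PySem.Set Int
  | common, [] => common
  | common, e :: rest =>
    let common' := PySem.Set.inter common (containers.getD e PySem.Set.empty)
    if common'.isEmpty then common' else pvInterLoop containers common' rest

def is_valid_refinement_py_alt (p : List (List Int)) (ref_p : List (List Int)) : Bool :=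
  let containers := pvBuildIdx p
  let allIdx : PySem.Set Int := PySem.List.pyRange 0 (p.length : Int) 1
  ref_p.foldl (fun ok c1 =>
    if (pvInterLoop containers allIdx c1).isEmpty then false else ok) true

-- ===== PRECONDITION & SPEC =====
def Spec_is_valid_refinement_py (p : List (List Int)) (ref_p : List (List Int)) (out : Bool) : Prop := out = is_valid_refinement_py_alt p ref_p
instance (p : List (List Int)) (ref_p : List (List Int)) (out : Bool) : Decidable (Spec_is_valid_refinement_py p ref_p out) := by unfold Spec_is_valid_refinement_py; infer_instance

-- ===== CLAIM (what is proved, stated in full; the proofs are below) =====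
def Claim_equal_is_valid_refinement_py : Prop := ∀ (p : List (List Int)) (ref_p : List (List Int)), Dom_is_valid_refinement_py p ref_p → Spec_is_valid_refinement_py p ref_p (is_valid_refinement_py p ref_p)

-- ===== LEMMAS AND PROOFS =====

-- A's outer loop: once val is false it stays false
theorem pv_foldl_guard (f : List Int → Bool) (l : List (List Int)) (b : Bool) :
    l.foldl (fun v c => if f c then v else false) b = (b && l.all f) := by
  induction l generalizing b with
  | nil => simp
  | cons c rest ih =>
      rw [List.foldl_cons, ih, List.all_cons]
      cases f c <;> simp

-- B's outer loop, with the branches the other way around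
theorem pv_foldl_guard' (g : List Int → Bool) (l : List (List Int)) (b : Bool) :
    l.foldl (fun v c => if g c then false else v) b = (b && l.all (fun c => !g c)) := by
  induction l generalizing b with
  | nil => simp
  | cons c rest ih =>
      rw [List.foldl_cons, ih, List.all_cons]
      cases g c <;> simp

-- the index dict after registering one community c under index k
theorem pv_mem_inner (c : List Int) (k : Int) (d : PySem.Dict Int (PySem.Set Int))
    (e i : Int) :
    i ∈ (c.foldl (fun d e => d.insert e (PySem.Set.add (d.getD e PySem.Set.empty) k)) d).getD e PySem.Set.empty
      ↔ i ∈ d.getD e PySem.Set.empty ∨ (e ∈ c ∧ i = k) := by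
  induction c generalizing d with
  | nil => simp
  | cons a c ih =>
      rw [List.foldl_cons, ih, PySem.Dict.getD_insert]
      by_cases h : e = a
      · subst h
        rw [if_pos rfl, PySem.Set.mem_add]
        simp only [List.mem_cons, true_or, true_and]
        tauto
      · rw [if_neg h]
        simp only [List.mem_cons]
        tauto

-- membership in the full element→indices dict
theorem pv_mem_buildIdx (p : List (List Int)) (e i : Int) :
    i ∈ (pvBuildIdx p).getD e PySem.Set.empty
      ↔ ∃ k : Nat, ∃ h : k < p.length, e ∈ p[k] ∧ i = (k : Int) := by
  have main : ∀ (l : List (Int × List Int)) (d : PySem.Dict Int (PySem.Set Int)),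
      i ∈ (l.foldl (fun d ic => ic.2.foldl
            (fun d e => d.insert e (PySem.Set.add (d.getD e PySem.Set.empty) ic.1)) d) d).getD e PySem.Set.empty
        ↔ i ∈ d.getD e PySem.Set.empty ∨ ∃ pr ∈ l, e ∈ pr.2 ∧ i = pr.1 := by
    intro l
    induction l with
    | nil => simp
    | cons a l ih =>
        intro d
        rw [List.foldl_cons, ih, pv_mem_inner]
        constructor
        · rintro ((h | h) | ⟨pr, hpr, h⟩)
          · exact Or.inl h
          · exact Or.inr ⟨a, List.mem_cons_self, h⟩
          · exact Or.inr ⟨pr, List.mem_cons_of_mem _ hpr, h⟩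
        · rintro (h | ⟨pr, hpr, h⟩)
          · exact Or.inl (Or.inl h)
          · rcases List.mem_cons.mp hpr with rfl | hpr
            · exact Or.inl (Or.inr h)
            · exact Or.inr ⟨pr, hpr, h⟩
  unfold pvBuildIdx
  rw [main]
  simp only [PySem.Dict.getD_empty, PySem.Set.empty, List.not_mem_nil, false_or]
  constructor
  · rintro ⟨pr, hpr, hmem, hi⟩
    rw [PySem.List.mem_enumerate_iff] at hpr
    obtain ⟨k, hk, rfl⟩ := hpr
    exact ⟨k, hk, by simpa using hmem, by simpa using hi⟩
  · rintro ⟨k, hk, hmem, hi⟩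
    exact ⟨((k : Int), p[k]),
      (PySem.List.mem_enumerate_iff _ _ _).mpr ⟨k, hk, by simp⟩, hmem, hi⟩

-- the intersection loop keeps exactly the indices present in every looked-up set
theorem pv_mem_interLoop (containers : PySem.Dict Int (PySem.Set Int))
    (c1 : List Int) (s : PySem.Set Int) (i : Int) :
    i ∈ pvInterLoop containers s c1
      ↔ i ∈ s ∧ ∀ e ∈ c1, i ∈ containers.getD e PySem.Set.empty := by
  induction c1 generalizing s with
  | nil => simp [pvInterLoop]
  | cons e rest ih =>
      simp only [pvInterLoop]
      by_cases h : (PySem.Set.inter s (containers.getD e PySem.Set.empty)).isEmpty = true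
      · rw [if_pos h]
        have hnil : PySem.Set.inter s (containers.getD e PySem.Set.empty) = [] :=
          List.isEmpty_iff.mp h
        rw [hnil]
        simp only [List.not_mem_nil, false_iff]
        rintro ⟨hs, hall⟩
        have hmem : i ∈ PySem.Set.inter s (containers.getD e PySem.Set.empty) :=
          (PySem.Set.mem_inter _ _ _).mpr ⟨hs, hall e (by simp)⟩
        rw [hnil] at hmem
        exact absurd hmem (List.not_mem_nil)
      · rw [if_neg h, ih, PySem.Set.mem_inter, List.forall_mem_cons]
        tauto

-- per refined community, A's scan of p and B's intersection test agree
theorem pv_cond_eq (p : List (List Int)) (c1 : List Int) :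
    p.any (fun c2 => PySem.Set.issubset c1 c2)
      = !(pvInterLoop (pvBuildIdx p) (PySem.List.pyRange 0 (p.length : Int) 1) c1).isEmpty := by
  rw [Bool.eq_iff_iff]
  simp only [List.any_eq_true, Bool.not_eq_true', List.isEmpty_eq_false_iff_exists_mem]
  constructor
  · rintro ⟨c2, hc2, hsub⟩
    rw [PySem.Set.issubset_iff] at hsub
    obtain ⟨k, hk, rfl⟩ := List.mem_iff_getElem.mp hc2
    refine ⟨(k : Int), (pv_mem_interLoop _ _ _ _).mpr ⟨?_, fun e he => ?_⟩⟩
    · rw [PySem.List.mem_pyRange_one]; omega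
    · exact (pv_mem_buildIdx p e (k : Int)).mpr ⟨k, hk, hsub e he, rfl⟩
  · rintro ⟨i, hi⟩
    obtain ⟨hrange, hall⟩ := (pv_mem_interLoop _ _ _ _).mp hi
    rw [PySem.List.mem_pyRange_one] at hrange
    by_cases hc : c1 = []
    · subst hc
      have hlen : 0 < p.length := by omega
      exact ⟨p[0], List.getElem_mem hlen,
        (PySem.Set.issubset_iff _ _).mpr (by simp)⟩
    · obtain ⟨e0, he0⟩ := List.exists_mem_of_ne_nil c1 hc
      obtain ⟨k, hk, _, hik⟩ := (pv_mem_buildIdx p e0 i).mp (hall e0 he0)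
      refine ⟨p[k], List.getElem_mem hk, (PySem.Set.issubset_iff _ _).mpr fun e he => ?_⟩
      obtain ⟨k', hk', hmem', hik'⟩ := (pv_mem_buildIdx p e i).mp (hall e he)
      have hkk : k' = k := by omega
      exact hkk ▸ hmem'

-- ===== VERDICT (by name: the statement is the Claim_ definition above) =====
theorem is_valid_refinement_py_spec : Claim_equal_is_valid_refinement_py := by
  intro p ref_p _
  unfold Spec_is_valid_refinement_py is_valid_refinement_py is_valid_refinement_py_alt
  simp only
  rw [pv_foldl_guard, pv_foldl_guard']
  congr 2
  funext c1
  exact pv_cond_eq p c1
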